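-- pv_equiv track=rewrite | github.com/vladkostikov/HSP | entrance/squirrel.py | squirrel
-- ===== SOURCE A (Python) =====
-- def squirrel(number: int) -> int:
--     if number < 1:
--         return 0
--
--     nuts = 1
--     counter = 1
--     while counter <= number:
--         nuts *= counter
--         counter += 1
--
--     emeralds = int(str(nuts)[0])
--     return emeralds
-- ===== SOURCE B (Python) =====
-- def squirrel(number: int) -> int:
--     if number < 1:
--         return 0
--
--     def prod(lo, hi):
--         # product of the integers lo..hi inclusive (lo <= hi), by binary splitting
--         if hi <= lo:
--             return lo
--         mid = (lo + hi) // 2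
--         return prod(lo, mid) * prod(mid + 1, hi)
--
--     nuts = prod(1, number)
--     while nuts >= 10:
--         nuts //= 10
--     return nuts
-- ===== Notes on version B (the rewrite author's own statement) =====
-- stated objective: alternative
-- what changed: B computes the factorial by a balanced divide-and-conquer product over the range instead of A's linear multiply loop, and extracts the leading decimal digit by repeated integer division instead of indexing into str(nuts).
import Mathlib
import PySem

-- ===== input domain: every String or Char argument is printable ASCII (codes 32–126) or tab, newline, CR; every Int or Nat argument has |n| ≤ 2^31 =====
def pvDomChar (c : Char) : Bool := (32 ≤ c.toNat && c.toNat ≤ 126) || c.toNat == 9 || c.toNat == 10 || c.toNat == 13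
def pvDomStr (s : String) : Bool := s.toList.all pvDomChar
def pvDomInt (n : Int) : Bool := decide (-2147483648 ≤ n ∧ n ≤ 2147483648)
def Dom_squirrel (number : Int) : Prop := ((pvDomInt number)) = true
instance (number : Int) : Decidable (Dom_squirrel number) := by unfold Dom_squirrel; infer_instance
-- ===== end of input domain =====

set_option maxRecDepth 40000


-- B replaces A's linear multiply loop by a balanced divide-and-conquer product of the range and
-- extracts the leading digit by repeated integer division instead of via string indexing (alternative).

-- ===== PORT A =====
-- the while loop 'while counter <= number: nuts *= counter; counter += 1', with a fuel
-- argument that merely makes the same computation total (fuel = number+1 steps always suffices)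
def squirrelGo : Nat → Int → Int → Int → Int
  | 0, _, nuts, _ => nuts
  | f + 1, number, nuts, counter =>
    if counter ≤ number then squirrelGo f number (nuts * counter) (counter + 1) else nuts

def squirrel (number : Int) : Int :=
  if number < 1 then 0
  else
    -- nuts = squirrelGo …; emeralds = int(str(nuts)[0]); str(nuts) is never empty and its first
    -- char is a digit, so the two 'none' fallbacks below are unreachable (totalisation only)
    match PySem.Str.pyGet? (PySem.Int.toStr (squirrelGo (number.toNat + 1) number 1 1)) 0 with
    | some c => (PySem.Int.ofStr? (String.ofList [c])).getD 0
    | none => 0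

-- ===== PORT B =====
-- 'def prod(lo, hi)': binary-splitting product of lo..hi, with a fuel argument that merely
-- makes the same recursion total ((hi-lo)+1 levels always suffice)
def prodGo : Nat → Int → Int → Int
  | 0, lo, _ => lo
  | f + 1, lo, hi =>
    if hi ≤ lo then lo
    else
      -- mid = (lo + hi) // 2 (inlined)
      prodGo f lo (PySem.Int.floordiv (lo + hi) 2) *
        prodGo f (PySem.Int.floordiv (lo + hi) 2 + 1) hi

-- 'while nuts >= 10: nuts //= 10' (fuel: nuts.toNat steps always suffice)
def msdGo : Nat → Int → Int
  | 0, n => n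
  | f + 1, n => if 10 ≤ n then msdGo f (PySem.Int.floordiv n 10) else n

def squirrel_alt (number : Int) : Int :=
  if number < 1 then 0
  else
    -- nuts = prod(1, number), then the while-loop (fuel nuts.toNat suffices: one digit per step)
    msdGo (prodGo ((number - 1).toNat + 1) 1 number).toNat
      (prodGo ((number - 1).toNat + 1) 1 number)

-- ===== PRECONDITION & SPEC =====
def Spec_squirrel (number : Int) (out : Int) : Prop := out = squirrel_alt number
instance (number : Int) (out : Int) : Decidable (Spec_squirrel number out) := by unfold Spec_squirrel; infer_instance

-- ===== CLAIM (what is proved, stated in full; the proofs are below) =====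
def Claim_equal_squirrel : Prop := ∀ (number : Int), Dom_squirrel number → Spec_squirrel number (squirrel number)

-- ===== LEMMAS AND PROOFS =====

-- proof-side most-significant-digit function on Nat
def msdN (n : Nat) : Nat :=
  if h : n < 10 then n else msdN (n / 10)
decreasing_by exact Nat.div_lt_self (by omega) (by omega)

lemma msdN_lt (n : Nat) : msdN n < 10 := by
  induction n using Nat.strong_induction_on with
  | _ n ih =>
    rw [msdN]
    split
    · omega
    · exact ih _ (Nat.div_lt_self (by omega) (by omega))

lemma msdGo_eq (f : Nat) : ∀ n : Nat, n ≤ f → msdGo f (n : Int) = ((msdN n : Nat) : Int) := by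
  induction f with
  | zero =>
    intro n hn
    interval_cases n
    simp [msdGo, msdN]
  | succ f ih =>
    intro n hn
    rw [msdGo]
    by_cases h : 10 ≤ n
    · rw [if_pos (by exact_mod_cast h)]
      rw [PySem.Int.floordiv_eq_ediv_of_pos (by norm_num)]
      rw [show (n : Int) / 10 = ((n / 10 : Nat) : Int) by omega]
      rw [ih (n / 10) (by omega)]
      conv_rhs => rw [msdN]
      rw [dif_neg (by omega)]
    · rw [if_neg (by exact_mod_cast h), msdN, dif_pos (by omega)]

lemma head_toDigitsCore (f : Nat) : ∀ (n : Nat) (ds : List Char), n < f →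
    (Nat.toDigitsCore 10 f n ds).head? = some (Nat.digitChar (msdN n)) := by
  induction f with
  | zero => intro n ds h; omega
  | succ f ih =>
    intro n ds h
    rw [Nat.toDigitsCore]
    by_cases h10 : n / 10 = 0
    · rw [if_pos h10]
      have hn : n < 10 := by omega
      rw [msdN, dif_pos hn, Nat.mod_eq_of_lt hn, List.head?_cons]
    · rw [if_neg h10]
      rw [ih (n / 10) _ (by omega)]
      conv_rhs => rw [msdN]
      rw [dif_neg (by omega)]

lemma ofChars_digit (d : Nat) (hd : d < 10) :
    PySem.Int.ofChars? [Nat.digitChar d] = some (d : Int) := by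
  interval_cases d <;> decide

-- binary-splitting product = ∏ over Ioc
lemma prodGo_eq (f : Nat) : ∀ lo hi : Int, lo ≤ hi → (hi - lo).toNat < f →
    prodGo f lo hi = ∏ i ∈ Finset.Ioc (lo - 1) hi, i := by
  induction f with
  | zero => intro lo hi h hf; omega
  | succ f ih =>
    intro lo hi hle hf
    rw [prodGo]
    by_cases h : hi ≤ lo
    · rw [if_pos h]
      have : hi = lo := le_antisymm h hle
      subst this
      have : Finset.Ioc (hi - 1) hi = {hi} := by
        ext x; simp [Finset.mem_Ioc]; omega
      rw [this, Finset.prod_singleton]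
    · rw [if_neg h]
      have hlt : lo < hi := by omega
      rw [show PySem.Int.floordiv (lo + hi) 2 = (lo + hi) / 2 from
        PySem.Int.floordiv_eq_ediv_of_pos (by norm_num)]
      set mid := (lo + hi) / 2 with hmid2
      have hlom : lo ≤ mid := by omega
      have hmhi : mid < hi := by omega
      rw [ih lo mid hlom (by omega), ih (mid + 1) hi (by omega) (by omega)]
      have hsplit : Finset.Ioc (lo - 1) mid ∪ Finset.Ioc mid hi = Finset.Ioc (lo - 1) hi :=
        Finset.Ioc_union_Ioc_eq_Ioc (by omega) (by omega)
      have hdisj : Disjoint (Finset.Ioc (lo - 1) mid) (Finset.Ioc mid hi) :=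
        Finset.Ioc_disjoint_Ioc_of_le le_rfl
      rw [show mid + 1 - 1 = mid from by ring, ← hsplit, Finset.prod_union hdisj]

-- A's while loop = acc * ∏ over Ioc
lemma squirrelGo_eq (f : Nat) : ∀ (number nuts counter : Int),
    (number + 1 - counter).toNat < f →
    squirrelGo f number nuts counter = nuts * ∏ i ∈ Finset.Ioc (counter - 1) number, i := by
  induction f with
  | zero => intro number nuts counter h; omega
  | succ f ih =>
    intro number nuts counter h
    rw [squirrelGo]
    by_cases hc : counter ≤ number
    · rw [if_pos hc]
      rw [ih number (nuts * counter) (counter + 1) (by omega)]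
      have hins : insert counter (Finset.Ioc counter number) = Finset.Ioc (counter - 1) number := by
        ext x; simp [Finset.mem_Ioc]; omega
      rw [← hins, Finset.prod_insert (by simp), mul_assoc]
      norm_num
    · rw [if_neg hc]
      have : Finset.Ioc (counter - 1) number = ∅ := by
        apply Finset.Ioc_eq_empty; omega
      rw [this, Finset.prod_empty, mul_one]

lemma prod_Ioc_pos (number : Int) : 0 < ∏ i ∈ Finset.Ioc (0 : Int) number, i := by
  apply Finset.prod_pos
  intro i hi
  simp [Finset.mem_Ioc] at hi
  omega

-- ===== VERDICT (by name: the statement is the Claim_ definition above) =====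
theorem squirrel_spec : Claim_equal_squirrel := by
  intro number _
  unfold Spec_squirrel squirrel squirrel_alt
  by_cases hlt : number < 1
  · simp [hlt]
  · rw [if_neg hlt, if_neg hlt]
    have h1 : (1 : Int) ≤ number := by omega
    set P : Int := ∏ i ∈ Finset.Ioc (0 : Int) number, i with hP
    have hPpos : 0 < P := prod_Ioc_pos number
    -- A's loop value
    have hA : squirrelGo (number.toNat + 1) number 1 1 = P := by
      rw [squirrelGo_eq _ _ _ _ (by omega), one_mul,
        show (1 : Int) - 1 = 0 from rfl, ← hP]
    -- B's product value
    have hB : prodGo ((number - 1).toNat + 1) 1 number = P := by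
      rw [prodGo_eq _ _ _ h1 (by omega), show (1 : Int) - 1 = 0 from rfl, ← hP]
    rw [hA, hB]
    -- both sides reduce to the leading decimal digit of P
    have hPn : P = ((P.toNat : Nat) : Int) := by omega
    have hPn1 : 1 ≤ P.toNat := by omega
    -- A side: first char of str(P)
    have htoStr : (PySem.Int.toStr P).toList = Nat.toDigits 10 P.toNat := by
      rw [PySem.Int.toList_toStr, PySem.Int.toChars]
      rw [if_neg (by omega)]
    have hhead : (PySem.Int.toStr P).toList.head? = some (Nat.digitChar (msdN P.toNat)) := by
      rw [htoStr, Nat.toDigits]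
      exact head_toDigitsCore _ _ _ (by omega)
    have hget : PySem.Str.pyGet? (PySem.Int.toStr P) 0 = some (Nat.digitChar (msdN P.toNat)) := by
      have : (0 : Int) = ((0 : Nat) : Int) := rfl
      rw [this, PySem.Str.pyGet?_natCast]
      rwa [← List.head?_eq_getElem?]
    rw [hget]
    have hof : PySem.Int.ofStr? (String.ofList [Nat.digitChar (msdN P.toNat)]) =
        some ((msdN P.toNat : Nat) : Int) := by
      have := ofChars_digit (msdN P.toNat) (msdN_lt _)
      simpa [PySem.Int.ofStr?] using this
    show (PySem.Int.ofStr? (String.ofList [(msdN P.toNat).digitChar])).getD 0 = msdGo P.toNat P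
    rw [hof, Option.getD_some]
    -- B side: msd loop
    rw [hPn, msdGo_eq _ _ (by omega)]
    simp
    congr 1
    omega
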